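-- pv_equiv track=rewrite | github.com/rolotrealanis98/open-apollo | mixer-engine/hardware.py | dim_attenuation_to_step
-- ===== SOURCE A (Python) =====
-- _DIM_STEPS_DB = [9, 17, 26, 34, 43, 51, 60]  # step 1..7
--
-- def dim_attenuation_to_step(db: int) -> int:
--     """Convert DimAttenuation (0-60 dB) to DimLevel step (1-7)."""
--     db = max(0, min(60, int(db)))
--     best_step = 1
--     best_dist = abs(db - _DIM_STEPS_DB[0])
--     for i, step_db in enumerate(_DIM_STEPS_DB[1:], start=2):
--         dist = abs(db - step_db)
--         if dist < best_dist:
--             best_dist = dist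
--             best_step = i
--     return best_step
-- ===== SOURCE B (Python) =====
-- # Midpoint-threshold lookup: step = 1 + number of doubled-integer midpoints strictly below 2*db.
-- _DIM_BOUNDARIES_2X = [26, 43, 60, 77, 94, 111]  # _DIM_STEPS_DB[i] + _DIM_STEPS_DB[i+1]
--
-- def dim_attenuation_to_step(db: int) -> int:
--     c = max(0, min(60, int(db)))
--     return 1 + sum(b < 2 * c for b in _DIM_BOUNDARIES_2X)
-- ===== Notes on version B (the rewrite author's own statement) =====
-- stated objective: simpler
-- what changed: Replaced the running nearest-distance scan over all reference values with a count of precomputed doubled-integer midpoint boundaries strictly below 2*db (exact midpoints fall to the lower step, matching A's strict < tie-break).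
import Mathlib
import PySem

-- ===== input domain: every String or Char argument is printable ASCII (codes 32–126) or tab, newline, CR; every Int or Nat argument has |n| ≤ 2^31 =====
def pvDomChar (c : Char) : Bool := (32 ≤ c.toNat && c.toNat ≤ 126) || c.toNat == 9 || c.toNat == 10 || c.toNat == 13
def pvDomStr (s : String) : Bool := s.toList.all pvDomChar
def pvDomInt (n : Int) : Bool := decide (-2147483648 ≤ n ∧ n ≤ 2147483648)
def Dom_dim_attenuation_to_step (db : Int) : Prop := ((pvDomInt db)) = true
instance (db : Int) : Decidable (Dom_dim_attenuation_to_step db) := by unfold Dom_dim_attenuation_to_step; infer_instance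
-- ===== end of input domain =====

-- B replaces A's nearest-distance scan with a count of precomputed doubled midpoint boundaries (simpler).

-- ===== PORT A =====
def pvDimStepsDb : List Int := [9, 17, 26, 34, 43, 51, 60]

def dim_attenuation_to_step (db : Int) : Int :=
  let db := max 0 (min 60 db)
  -- best_step = 1; best_dist = abs(db - _DIM_STEPS_DB[0]); loop over enumerate(_DIM_STEPS_DB[1:], start=2)
  let st := (PySem.List.enumerate (pvDimStepsDb.drop 1) 2).foldl
    (fun (st : Int × Int) (p : Int × Int) =>
      let dist := |db - p.2|
      if dist < st.2 then (p.1, dist) else st)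
    (1, |db - 9|)
  st.1

-- ===== PORT B =====
def pvDimBoundaries2x : List Int := [26, 43, 60, 77, 94, 111]

def dim_attenuation_to_step_alt (db : Int) : Int :=
  let c := max 0 (min 60 db)
  1 + pvDimBoundaries2x.foldl (fun acc b => acc + (if b < 2 * c then 1 else 0)) 0

-- ===== PRECONDITION & SPEC =====
def Spec_dim_attenuation_to_step (db : Int) (out : Int) : Prop := out = dim_attenuation_to_step_alt db
instance (db : Int) (out : Int) : Decidable (Spec_dim_attenuation_to_step db out) := by unfold Spec_dim_attenuation_to_step; infer_instance

-- ===== CLAIM (what is proved, stated in full; the proofs are below) =====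
def Claim_equal_dim_attenuation_to_step : Prop := ∀ (db : Int), Dom_dim_attenuation_to_step db → Spec_dim_attenuation_to_step db (dim_attenuation_to_step db)

-- ===== LEMMAS AND PROOFS =====
-- Both ports depend on db only through the clamped value c = max 0 (min 60 db) ∈ [0, 60]; check all 61 cases.
theorem pvClampCase (c : Int) (h0 : 0 ≤ c) (h1 : c ≤ 60) :
    ((PySem.List.enumerate (pvDimStepsDb.drop 1) 2).foldl
        (fun (st : Int × Int) (p : Int × Int) =>
          let dist := |c - p.2|
          if dist < st.2 then (p.1, dist) else st)
        (1, |c - 9|)).1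
    = 1 + pvDimBoundaries2x.foldl (fun acc b => acc + (if b < 2 * c then 1 else 0)) 0 := by
  interval_cases c <;> decide

-- ===== VERDICT (by name: the statement is the Claim_ definition above) =====
theorem dim_attenuation_to_step_spec : Claim_equal_dim_attenuation_to_step := by
  intro db _
  unfold Spec_dim_attenuation_to_step dim_attenuation_to_step dim_attenuation_to_step_alt
  have h0 : (0 : Int) ≤ max 0 (min 60 db) := le_max_left _ _
  have h1 : max 0 (min 60 db) ≤ 60 := by omega
  exact pvClampCase _ h0 h1
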